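-- pv_equiv track=rewrite | github.com/jcjackchen/WizardParty | utility_ref.py | possible7
-- ===== SOURCE A (Python) =====
-- def possible7(order,constraint):
--
--     collect = []
--     wiz_a = constraint[0]
--     wiz_b = constraint[1]
--     wiz_c = constraint[2]
--
--     for i in range(len(order)+1):
--         order1 = order[:]
--         order1.insert(i,wiz_a)
--
--         for j in range(i+1,len(order1)+1):
--             order2 = order1[:]
--             order2.insert(j,wiz_b)
--
--             for k in range(j+1,len(order2)+1):
--                 order3 = order2[:]
--                 order3.insert(k,wiz_c)
--                 collect += [order3]
--
--     return collect
-- ===== SOURCE B (Python) =====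
-- def possible7(order, constraint):
--     wizards = [constraint[0], constraint[1], constraint[2]]
--
--     def merge(xs, cs):
--         # all interleavings of xs and cs keeping both relative orders,
--         # in lexicographic order of the positions of cs's elements
--         if not cs:
--             return [list(xs)]
--         if not xs:
--             return [list(cs)]
--         out = [[cs[0]] + rest for rest in merge(xs, cs[1:])]
--         out += [[xs[0]] + rest for rest in merge(xs[1:], cs)]
--         return out
--
--     return merge(order, wizards)
-- ===== Notes on version B (the rewrite author's own statement) =====
-- stated objective: alternative
-- what changed: Replaces A's three nested position loops, each copying the list and calling insert, by a single structural recursion that enumerates all order-preserving interleavings of the three wizards with the order list (same lists, same lexicographic order).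
import Mathlib
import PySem

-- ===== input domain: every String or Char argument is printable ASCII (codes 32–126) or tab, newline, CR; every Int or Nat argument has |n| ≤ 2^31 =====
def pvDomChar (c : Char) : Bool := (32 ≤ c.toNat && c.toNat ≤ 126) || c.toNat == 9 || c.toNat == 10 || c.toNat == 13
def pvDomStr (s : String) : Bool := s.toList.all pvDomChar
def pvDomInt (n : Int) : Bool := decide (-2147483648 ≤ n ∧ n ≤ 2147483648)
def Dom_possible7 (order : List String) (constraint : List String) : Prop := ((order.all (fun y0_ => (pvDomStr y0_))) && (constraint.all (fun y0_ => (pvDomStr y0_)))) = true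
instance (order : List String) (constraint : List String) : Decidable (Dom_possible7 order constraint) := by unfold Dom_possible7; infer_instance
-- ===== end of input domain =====

-- B replaces A's three nested position loops with insert/copy chains by one structural
-- recursion interleaving the three wizards into `order` (objective: alternative decomposition).

-- ===== PORT A =====
def possible7 (order : List String) (constraint : List String) : List (List String) :=
  let wiz_a := (PySem.List.pyGet? constraint 0).getD ""   -- constraint[0]; IndexError excluded by Pre_
  let wiz_b := (PySem.List.pyGet? constraint 1).getD ""
  let wiz_c := (PySem.List.pyGet? constraint 2).getD ""
  (PySem.List.pyRange 0 ((order.length : Int) + 1) 1).foldl (fun collect i =>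
    let order1 := PySem.List.insert order i wiz_a
    (PySem.List.pyRange (i + 1) ((order1.length : Int) + 1) 1).foldl (fun collect j =>
      let order2 := PySem.List.insert order1 j wiz_b
      (PySem.List.pyRange (j + 1) ((order2.length : Int) + 1) 1).foldl (fun collect k =>
        let order3 := PySem.List.insert order2 k wiz_c
        collect ++ [order3]) collect) collect) []

-- ===== PORT B =====
-- all interleavings of xs and cs keeping both relative orders, lexicographic in cs's positions
def possible7Merge (xs : List String) (cs : List String) : List (List String) :=
  match xs, cs with
  | xs, [] => [xs]
  | [], cs => [cs]
  | x :: xs', c :: cs' =>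
      (possible7Merge (x :: xs') cs').map (fun rest => c :: rest)
        ++ (possible7Merge xs' (c :: cs')).map (fun rest => x :: rest)
termination_by xs.length + cs.length

def possible7_alt (order : List String) (constraint : List String) : List (List String) :=
  let wizards := [(PySem.List.pyGet? constraint 0).getD "",
                  (PySem.List.pyGet? constraint 1).getD "",
                  (PySem.List.pyGet? constraint 2).getD ""]
  possible7Merge order wizards

-- ===== PRECONDITION & SPEC =====
-- Pre_ excludes only the inputs where Python A raises IndexError (constraint shorter than 3).
def Pre_possible7 (order : List String) (constraint : List String) : Prop :=
  3 ≤ constraint.length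
instance (order : List String) (constraint : List String) : Decidable (Pre_possible7 order constraint) := by unfold Pre_possible7; infer_instance

def pvWitness_possible7 : List String × List String := (["x", "y"], ["a", "b", "c"])

def Spec_possible7 (order : List String) (constraint : List String) (out : List (List String)) : Prop := out = possible7_alt order constraint
instance (order : List String) (constraint : List String) (out : List (List String)) : Decidable (Spec_possible7 order constraint out) := by unfold Spec_possible7; infer_instance

-- ===== CLAIM (what is proved, stated in full; the proofs are below) =====
def Claim_equal_possible7 : Prop := ∀ (order : List String) (constraint : List String), Dom_possible7 order constraint → Pre_possible7 order constraint → Spec_possible7 order constraint (possible7 order constraint)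

-- ===== LEMMAS AND PROOFS =====

lemma possible7Merge_nil_left (cs : List String) : possible7Merge [] cs = [cs] := by
  cases cs <;> simp [possible7Merge]

-- head-level characterisation of the merge recursion
lemma possible7Merge_cons (c : String) (cs : List String) (xs : List String) :
    possible7Merge xs (c :: cs) =
      (List.range (xs.length + 1)).flatMap
        (fun i => (possible7Merge (xs.drop i) cs).map (fun m => xs.take i ++ c :: m)) := by
  induction xs with
  | nil =>
      simp [possible7Merge_nil_left]
  | cons x xs' ih =>
      rw [show (x :: xs').length + 1 = (xs'.length + 1) + 1 from rfl, List.range_succ_eq_map]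
      simp only [List.flatMap_cons, List.flatMap_map]
      have hsucc : ∀ i : Nat,
          (possible7Merge ((x :: xs').drop (Nat.succ i)) cs).map
              (fun m => (x :: xs').take (Nat.succ i) ++ c :: m)
            = ((possible7Merge (xs'.drop i) cs).map (fun m => xs'.take i ++ c :: m)).map
                (fun rest => x :: rest) := by
        intro i; simp [List.map_map, Function.comp]
      simp only [hsucc]
      rw [← List.map_flatMap, ← ih]
      simp [possible7Merge]

-- helper: dropping / taking just past an explicit prefix
lemma drop_prefix_succ {α : Type} (l1 l2 : List α) (w : α) :
    (l1 ++ w :: l2).drop (l1.length + 1) = l2 := by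
  simp [List.drop_append]

lemma take_prefix_succ {α : Type} (l1 l2 : List α) (w : α) :
    (l1 ++ w :: l2).take (l1.length + 1) = l1 ++ [w] := by
  simp [List.take_append]

-- A's nested loops, abstracted: loopA ys s cs acc inserts the wizards of cs into ys at
-- positions ≥ s in lexicographic order, exactly as A's remaining nested loops do.
def loopA (ys : List String) (s : Int) (cs : List String) (acc : List (List String)) :
    List (List String) :=
  match cs with
  | [] => acc ++ [ys]
  | w :: cs' =>
      (PySem.List.pyRange s ((ys.length : Int) + 1) 1).foldl
        (fun collect j => loopA (PySem.List.insert ys j w) (j + 1) cs' collect) acc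

lemma loopA_eq (cs : List String) : ∀ (ys : List String) (s : Nat), s ≤ ys.length →
    ∀ (acc : List (List String)),
    loopA ys (s : Int) cs acc
      = acc ++ (possible7Merge (ys.drop s) cs).map (fun m => ys.take s ++ m) := by
  induction cs with
  | nil =>
      intro ys s hs acc
      simp [loopA, possible7Merge]
  | cons w cs' ih =>
      intro ys s hs acc
      rw [loopA, PySem.List.pyRange_one]
      have hcnt : (((ys.length : Int) + 1) - (s : Int)).toNat = (ys.drop s).length + 1 := by
        simp only [List.length_drop]; omega
      rw [hcnt, List.foldl_map]
      have hbody :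
          List.foldl
            (fun (collect : List (List String)) (k : Nat) =>
              loopA (PySem.List.insert ys ((s : Int) + (k : Int)) w) ((s : Int) + (k : Int) + 1) cs' collect)
            acc (List.range ((ys.drop s).length + 1))
          = List.foldl
            (fun (collect : List (List String)) (k : Nat) =>
              collect ++
                ((possible7Merge ((ys.drop s).drop k) cs').map
                  (fun m => (ys.drop s).take k ++ w :: m)).map (fun m => ys.take s ++ m))
            acc (List.range ((ys.drop s).length + 1)) := by
        refine PySem.List.foldl_congr_mem _ _ _ _ ?_
        intro collect k hk
        have hk' : k ≤ ys.length - s := by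
          have := List.mem_range.mp hk
          simp only [List.length_drop] at this; omega
        have hsk : s + k ≤ ys.length := by omega
        have hcast : (s : Int) + (k : Int) = ((s + k : Nat) : Int) := by push_cast; ring
        rw [hcast, PySem.List.insert_natCast _ _ _ hsk]
        have h1 : ((s + k : Nat) : Int) + 1 = ((s + k + 1 : Nat) : Int) := by push_cast; ring
        have hlen : s + k + 1 ≤ (ys.take (s + k) ++ w :: ys.drop (s + k)).length := by
          simp only [List.length_append, List.length_take, List.length_cons, List.length_drop]
          omega
        rw [h1, ih _ (s + k + 1) hlen]
        have htk : (ys.take (s + k)).length = s + k := by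
          simp only [List.length_take]; omega
        have hdrop : (ys.take (s + k) ++ w :: ys.drop (s + k)).drop (s + k + 1) = ys.drop (s + k) := by
          rw [show s + k + 1 = (ys.take (s + k)).length + 1 by rw [htk]]
          exact drop_prefix_succ _ _ _
        have htake : (ys.take (s + k) ++ w :: ys.drop (s + k)).take (s + k + 1)
            = ys.take (s + k) ++ [w] := by
          rw [show s + k + 1 = (ys.take (s + k)).length + 1 by rw [htk]]
          exact take_prefix_succ _ _ _
        rw [hdrop, htake]
        congr 1
        rw [List.map_map]
        have hdd : ys.drop (s + k) = (ys.drop s).drop k := by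
          rw [List.drop_drop]
        have hta : ys.take (s + k) = ys.take s ++ (ys.drop s).take k := by
          rw [List.take_add]
        rw [hdd, hta]
        apply List.map_congr_left
        intro m _
        simp [Function.comp, List.append_assoc]
      rw [hbody, PySem.List.foldl_append_eq_flatMap]
      congr 1
      rw [possible7Merge_cons, List.map_flatMap]

lemma possible7_eq_loopA (order : List String) (a b c : String) (rest : List String) :
    possible7 order (a :: b :: c :: rest) = loopA order 0 [a, b, c] [] := by
  have ha : (PySem.List.pyGet? (a :: b :: c :: rest) 0).getD "" = a := by
    rw [show (0 : Int) = ((0 : Nat) : Int) from rfl, PySem.List.pyGet?_natCast]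
    simp
  have hb : (PySem.List.pyGet? (a :: b :: c :: rest) 1).getD "" = b := by
    rw [show (1 : Int) = ((1 : Nat) : Int) from rfl, PySem.List.pyGet?_natCast]
    simp
  have hc : (PySem.List.pyGet? (a :: b :: c :: rest) 2).getD "" = c := by
    rw [show (2 : Int) = ((2 : Nat) : Int) from rfl, PySem.List.pyGet?_natCast]
    simp
  simp only [possible7, ha, hb, hc, loopA]

-- ===== VERDICT (by name: the statement is the Claim_ definition above) =====
theorem possible7_spec : Claim_equal_possible7 := by
  intro order constraint _hdom hpre
  rcases constraint with _ | ⟨a, constraint⟩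
  · exact absurd hpre (by simp [Pre_possible7])
  rcases constraint with _ | ⟨b, constraint⟩
  · exact absurd hpre (by simp [Pre_possible7])
  rcases constraint with _ | ⟨c, rest⟩
  · exact absurd hpre (by simp [Pre_possible7])
  show possible7 order (a :: b :: c :: rest) = possible7_alt order (a :: b :: c :: rest)
  rw [possible7_eq_loopA]
  have h0 := loopA_eq [a, b, c] order 0 (Nat.zero_le _) []
  simp only [Nat.cast_zero, List.drop_zero, List.take_zero, List.nil_append] at h0
  rw [h0]
  have ha : (PySem.List.pyGet? (a :: b :: c :: rest) 0).getD "" = a := by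
    rw [show (0 : Int) = ((0 : Nat) : Int) from rfl, PySem.List.pyGet?_natCast]
    simp
  have hb : (PySem.List.pyGet? (a :: b :: c :: rest) 1).getD "" = b := by
    rw [show (1 : Int) = ((1 : Nat) : Int) from rfl, PySem.List.pyGet?_natCast]
    simp
  have hc : (PySem.List.pyGet? (a :: b :: c :: rest) 2).getD "" = c := by
    rw [show (2 : Int) = ((2 : Nat) : Int) from rfl, PySem.List.pyGet?_natCast]
    simp
  simp only [possible7_alt, ha, hb, hc]
  simp
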